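-- pv_equiv track=rewrite | github.com/johanaxel007/AdventOfCode-2025 | Day01/main_day01.py | apply_rotation_single_tick
-- ===== SOURCE A (Python) =====
-- def calculate_new_lock_value(rotation_step: int, current_lock_value: int, lock_size: int) -> int:
--     """
--     Calculate the new lock value after a rotation. Accounts for the lock being circular by making sure the value is always between 0 and lock_size - 1.
--     :param rotation_step: The rotation step amount to apply.
--     :param current_lock_value: The current value of the lock.
--     :param lock_size: The max bound of the lock.
--     :return: The new lock value.
--     """
--     new_value: int = current_lock_value + rotation_step
--
--     while new_value < 0:
--         new_value += lock_size
--     while new_value >= lock_size: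
--         new_value -= lock_size
--
--     return new_value
--
-- def apply_rotation_single_tick(rotation: int, current_lock_value: int, lock_size: int) -> tuple[int, int]:
--     """
--     Apply a full rotation to the lock and return the new lock value and the number of times the lock was passed 0 using 0x434C49434B method.
--     :param rotation: The full rotation (eg: -68 or 48)
--     :param current_lock_value: The current value of the lock.
--     :param lock_size: The max bound of the lock.
--     :return: Tuple of (new_lock_value, at_zero_count)
--     """
--     new_value = current_lock_value
--     at_zero_count: int = 0
--
--     rotation_steps: int = abs(rotation)
--     rotation_direction: int = 1 if rotation > 0 else -1
--
--     while rotation_steps > 0: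
--         new_value = calculate_new_lock_value(rotation_direction, new_value, lock_size)
--
--         if new_value == 0:
--             at_zero_count += 1
--
--         rotation_steps -= 1
--
--     return new_value, at_zero_count
-- ===== SOURCE B (Python) =====
-- def apply_rotation_single_tick(rotation: int, current_lock_value: int, lock_size: int) -> tuple[int, int]:
--     """Closed-form O(1): final position by modular arithmetic; zero crossings counted
--     as the number of ticks i in [1, |rotation|] congruent to (-dir*current) mod lock_size."""
--     if rotation == 0:
--         return current_lock_value, 0
--     s = abs(rotation)
--     d = 1 if rotation > 0 else -1
--     final = (current_lock_value + d * s) % lock_size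
--     r = (-d * current_lock_value) % lock_size
--     if r == 0:
--         count = s // lock_size
--     elif r <= s:
--         count = (s - r) // lock_size + 1
--     else:
--         count = 0
--     return final, count
-- ===== Notes on version B (the rewrite author's own statement) =====
-- stated objective: faster
-- what changed: Replaced the tick-by-tick simulation loop (one normalized step per unit of rotation, counting zeros as they appear) by closed-form modular arithmetic: final value via one % and the zero-crossing count via a floor-division formula counting the i in [1,|rotation|] congruent to (-dir*current) mod lock_size.
-- outside the precondition, e.g. on apply_rotation_single_tick(1, 0, 0): A does not finish within the time limit, B raises ZeroDivisionError
import Mathlib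
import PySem

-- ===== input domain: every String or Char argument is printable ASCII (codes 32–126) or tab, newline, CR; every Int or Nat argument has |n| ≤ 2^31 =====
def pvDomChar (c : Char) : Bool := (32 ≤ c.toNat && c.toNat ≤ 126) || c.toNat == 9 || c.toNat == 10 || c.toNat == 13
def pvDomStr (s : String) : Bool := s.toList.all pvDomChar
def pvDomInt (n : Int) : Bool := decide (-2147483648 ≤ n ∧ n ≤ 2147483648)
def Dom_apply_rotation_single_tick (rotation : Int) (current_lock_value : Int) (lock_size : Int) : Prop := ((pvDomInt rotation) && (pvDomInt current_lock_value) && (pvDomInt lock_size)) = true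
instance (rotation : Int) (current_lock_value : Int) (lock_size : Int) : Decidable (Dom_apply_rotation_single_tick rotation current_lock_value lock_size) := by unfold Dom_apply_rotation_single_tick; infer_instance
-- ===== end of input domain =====

-- B replaces A's per-tick simulation loop by closed-form modular arithmetic (objective: faster).

-- ===== PORT A =====
-- 'while new_value < 0: new_value += lock_size' — the fuel only makes the loop a total
-- function; on every Pre_ input the fuel chosen below is shown sufficient.
def pvNormUp (v n : Int) (fuel : Nat) : Int :=
  match fuel with
  | 0 => v
  | f + 1 => if v < 0 then pvNormUp (v + n) n f else v

-- 'while new_value >= lock_size: new_value -= lock_size'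
def pvNormDown (v n : Int) (fuel : Nat) : Int :=
  match fuel with
  | 0 => v
  | f + 1 => if v ≥ n then pvNormDown (v - n) n f else v

def calculate_new_lock_value (rotation_step : Int) (current_lock_value : Int) (lock_size : Int) : Int :=
  let nv := current_lock_value + rotation_step
  let fuel := nv.natAbs + lock_size.natAbs
  pvNormDown (pvNormUp nv lock_size fuel) lock_size fuel

-- A's 'while rotation_steps > 0: …', recursion on the remaining step count
def pvLoopA (steps : Nat) (dir v n zc : Int) : Int × Int :=
  match steps with
  | 0 => (v, zc)
  | k + 1 =>
    let v' := calculate_new_lock_value dir v n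
    pvLoopA k dir v' n (if v' = 0 then zc + 1 else zc)

def apply_rotation_single_tick (rotation : Int) (current_lock_value : Int) (lock_size : Int) : Int × Int :=
  pvLoopA rotation.natAbs (if rotation > 0 then 1 else -1) current_lock_value lock_size 0

-- ===== PORT B =====
def apply_rotation_single_tick_alt (rotation : Int) (current_lock_value : Int) (lock_size : Int) : Int × Int :=
  if rotation = 0 then (current_lock_value, 0)
  else
    let s : Int := |rotation|
    let d : Int := if rotation > 0 then 1 else -1
    let final := PySem.Int.mod (current_lock_value + d * s) lock_size
    let r := PySem.Int.mod (-d * current_lock_value) lock_size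
    let count : Int :=
      if r = 0 then PySem.Int.floordiv s lock_size
      else if r ≤ s then PySem.Int.floordiv (s - r) lock_size + 1
      else 0
    (final, count)

-- ===== PRECONDITION & SPEC =====
-- Pre_ excludes exactly the inputs on which A never returns: with rotation ≠ 0 and
-- lock_size ≤ 0 the normalisation while-loops of calculate_new_lock_value run forever.
def Pre_apply_rotation_single_tick (rotation : Int) (current_lock_value : Int) (lock_size : Int) : Prop :=
  rotation = 0 ∨ 1 ≤ lock_size

instance (rotation : Int) (current_lock_value : Int) (lock_size : Int) : Decidable (Pre_apply_rotation_single_tick rotation current_lock_value lock_size) := by unfold Pre_apply_rotation_single_tick; infer_instance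

def pvWitness_apply_rotation_single_tick : Int × Int × Int := (5, 2, 10)

def Spec_apply_rotation_single_tick (rotation : Int) (current_lock_value : Int) (lock_size : Int) (out : Int × Int) : Prop := out = apply_rotation_single_tick_alt rotation current_lock_value lock_size
instance (rotation : Int) (current_lock_value : Int) (lock_size : Int) (out : Int × Int) : Decidable (Spec_apply_rotation_single_tick rotation current_lock_value lock_size out) := by unfold Spec_apply_rotation_single_tick; infer_instance

-- ===== CLAIM (what is proved, stated in full; the proofs are below) =====
def Claim_equal_apply_rotation_single_tick : Prop := ∀ (rotation : Int) (current_lock_value : Int) (lock_size : Int), Dom_apply_rotation_single_tick rotation current_lock_value lock_size → Pre_apply_rotation_single_tick rotation current_lock_value lock_size → Spec_apply_rotation_single_tick rotation current_lock_value lock_size (apply_rotation_single_tick rotation current_lock_value lock_size)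

-- ===== LEMMAS AND PROOFS =====

-- B's zero-crossing count, written with Lean's ediv (= Python's // for a positive divisor):
-- the number of i in [1, s] with i ≡ r (mod n)
def pvCount (n s r : Int) : Int :=
  if r = 0 then s / n else if r ≤ s then (s - r) / n + 1 else 0

lemma pvNormUp_spec (n : Int) (hn : 1 ≤ n) :
    ∀ (fuel : Nat) (v : Int), (v < 0 → v.natAbs ≤ fuel) →
      0 ≤ pvNormUp v n fuel ∧ pvNormUp v n fuel % n = v % n ∧ pvNormUp v n fuel ≤ max v n := by
  intro fuel
  induction fuel with
  | zero =>
    intro v hv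
    refine ⟨?_, ?_, ?_⟩ <;> simp only [pvNormUp] <;> omega
  | succ f ih =>
    intro v hv
    by_cases h : v < 0
    · obtain ⟨h1, h2, h3⟩ := ih (v + n) (by omega)
      refine ⟨?_, ?_, ?_⟩ <;> simp only [pvNormUp, if_pos h]
      · exact h1
      · rw [h2, show v + n = v + n * 1 from by ring, Int.add_mul_emod_self_left]
      · omega
    · refine ⟨?_, ?_, ?_⟩ <;> simp only [pvNormUp, if_neg h] <;> omega

lemma pvNormDown_spec (n : Int) (hn : 1 ≤ n) :
    ∀ (fuel : Nat) (v : Int), 0 ≤ v → v ≤ (fuel : Int) →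
      0 ≤ pvNormDown v n fuel ∧ pvNormDown v n fuel < n ∧ pvNormDown v n fuel % n = v % n := by
  intro fuel
  induction fuel with
  | zero =>
    intro v hv hf
    refine ⟨?_, ?_, ?_⟩ <;> simp only [pvNormDown] <;> omega
  | succ f ih =>
    intro v hv hf
    by_cases h : v ≥ n
    · obtain ⟨h1, h2, h3⟩ := ih (v - n) (by omega) (by push_cast at hf ⊢; omega)
      refine ⟨?_, ?_, ?_⟩ <;> simp only [pvNormDown, if_pos h]
      · exact h1
      · exact h2
      · rw [h3, Int.sub_emod, Int.emod_self, sub_zero, Int.emod_emod_of_dvd _ dvd_rfl]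
    · refine ⟨?_, ?_, ?_⟩ <;> simp only [pvNormDown, if_neg h] <;> omega

-- A's single tick is exactly one Euclidean-mod step (for a positive lock size)
lemma calc_eq_emod (d v n : Int) (hn : 1 ≤ n) :
    calculate_new_lock_value d v n = (v + d) % n := by
  show pvNormDown (pvNormUp (v + d) n ((v + d).natAbs + n.natAbs)) n ((v + d).natAbs + n.natAbs)
      = (v + d) % n
  set nv := v + d with hnv
  set fuel := nv.natAbs + n.natAbs with hfuel
  obtain ⟨u1, u2, u3⟩ := pvNormUp_spec n hn fuel nv (by omega)
  set u := pvNormUp nv n fuel with hu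
  obtain ⟨r1, r2, r3⟩ := pvNormDown_spec n hn fuel u u1 (by
    have h1 : nv ≤ (nv.natAbs : Int) := Int.le_natAbs
    omega)
  calc pvNormDown u n fuel = pvNormDown u n fuel % n := (Int.emod_eq_of_lt r1 r2).symm
    _ = u % n := r3
    _ = nv % n := u2

-- one more tick adds 1 to the count exactly when the residue r is hit, and shifts r by -1
lemma pvCount_step (n s r : Int) (hn : 1 ≤ n) (hr0 : 0 ≤ r) (hrn : r < n) (hs : 0 ≤ s) :
    pvCount n (s + 1) r = (if r = 1 % n then 1 else 0) + pvCount n s ((r - 1) % n) := by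
  unfold pvCount
  by_cases h1 : n = 1
  · subst h1
    have : r = 0 := by omega
    subst this
    simp
    omega
  · have hn2 : 2 ≤ n := by omega
    have h1n : (1 : Int) % n = 1 := Int.emod_eq_of_lt (by omega) (by omega)
    rw [h1n]
    by_cases hr : r = 0
    · subst hr
      have hneg : ((0:Int) - 1) % n = n - 1 := by
        rw [show (0:Int) - 1 = (n - 1) + (-1) * n from by ring, Int.add_mul_emod_self_right,
          Int.emod_eq_of_lt (by omega) (by omega)]
      rw [hneg, if_pos rfl, if_neg (by omega : ¬ (0:Int) = 1), if_neg (by omega : ¬ (n-1:Int) = 0)]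
      by_cases hc : n - 1 ≤ s
      · rw [if_pos hc]
        have e1 : (s + 1 - n + 1 * n) / n = (s + 1 - n) / n + 1 :=
          Int.add_mul_ediv_right _ _ (by omega)
        rw [show s + 1 - n + 1 * n = s + 1 from by ring] at e1
        rw [e1, show s - (n - 1) = s + 1 - n from by ring]
        ring
      · rw [if_neg hc, Int.ediv_eq_zero_of_lt (by omega) (by omega)]
        ring
    · by_cases hr1 : r = 1
      · subst hr1
        rw [if_pos rfl, if_neg hr, if_pos (by omega : (1:Int) ≤ s + 1),
          show (1:Int) - 1 = 0 from by ring, Int.zero_emod, if_pos rfl,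
          show s + 1 - 1 = s from by ring]
        ring
      · have hrm : (r - 1) % n = r - 1 := Int.emod_eq_of_lt (by omega) (by omega)
        rw [hrm, if_neg hr, if_neg hr1, if_neg (by omega : ¬ r - 1 = 0)]
        by_cases hc : r ≤ s + 1
        · rw [if_pos hc, if_pos (by omega), show s + 1 - r = s - (r - 1) from by ring]
          ring
        · rw [if_neg hc, if_neg (by omega)]
          ring

lemma emod_mul_left (n a c : Int) : (c * (a % n)) % n = (c * a) % n := by
  rw [Int.mul_emod, Int.emod_emod_of_dvd _ dvd_rfl, ← Int.mul_emod]

-- invariant of A's main loop: final value and zero count in closed form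
lemma pvLoopA_spec (d n : Int) (hd : d = 1 ∨ d = -1) (hn : 1 ≤ n) :
    ∀ (k : Nat) (v zc : Int),
      pvLoopA k d v n zc =
        ((if k = 0 then v else (v + d * k) % n), zc + pvCount n k ((-d * v) % n)) := by
  have hdd : d * d = 1 := by rcases hd with h | h <;> subst h <;> ring
  intro k
  induction k with
  | zero =>
    intro v zc
    have hr0 : 0 ≤ (-d * v) % n := Int.emod_nonneg _ (by omega)
    have hc0 : pvCount n ((0 : Nat) : Int) ((-d * v) % n) = 0 := by
      unfold pvCount
      rw [Nat.cast_zero]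
      by_cases h : (-d * v) % n = 0
      · rw [if_pos h, Int.zero_ediv]
      · rw [if_neg h, if_neg (by omega : ¬ (-d * v) % n ≤ 0)]
    show (v, zc) = (if (0 : Nat) = 0 then v else (v + d * ((0 : Nat) : Int)) % n,
      zc + pvCount n ((0 : Nat) : Int) ((-d * v) % n))
    rw [if_pos rfl, hc0, add_zero]
  | succ k ih =>
    intro v zc
    have hr0 : 0 ≤ (-d * v) % n := Int.emod_nonneg _ (by omega)
    have hrn : (-d * v) % n < n := Int.emod_lt_of_pos _ (by omega)
    simp only [pvLoopA]
    rw [calc_eq_emod d v n hn, ih]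
    have factA : (-d * ((v + d) % n)) % n = (((-d * v) % n) - 1) % n := by
      rw [emod_mul_left, show -d * (v + d) = -d * v - d * d from by ring, hdd,
        Int.sub_emod (-d * v) 1, Int.sub_emod ((-d * v) % n) 1,
        Int.emod_emod_of_dvd _ dvd_rfl]
    have factB : ((v + d) % n = 0) ↔ ((-d * v) % n = 1 % n) := by
      constructor
      · intro h
        have hdvd : n ∣ v + d := Int.dvd_of_emod_eq_zero h
        rw [Int.emod_eq_emod_iff_emod_sub_eq_zero]
        apply Int.emod_eq_zero_of_dvd
        have : -d * v - 1 = -d * (v + d) := by linear_combination hdd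
        rw [this]
        exact Dvd.dvd.mul_left hdvd (-d)
      · intro h
        rw [Int.emod_eq_emod_iff_emod_sub_eq_zero] at h
        have hdvd : n ∣ -d * v - 1 := Int.dvd_of_emod_eq_zero h
        apply Int.emod_eq_zero_of_dvd
        have : v + d = -d * (-d * v - 1) := by linear_combination (-v) * hdd
        rw [this]
        exact Dvd.dvd.mul_left hdvd (-d)
    have hcast : ((k + 1 : Nat) : Int) = (k : Int) + 1 := by push_cast; ring
    have hstep := pvCount_step n (k : Int) ((-d * v) % n) hn hr0 hrn (by positivity)
    rw [Prod.ext_iff]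
    constructor
    · rw [if_neg (Nat.succ_ne_zero k), hcast]
      by_cases hk : k = 0
      · subst hk
        rw [if_pos rfl]
        push_cast
        ring_nf
      · rw [if_neg hk, Int.emod_add_emod]
        ring_nf
    · simp only [factA, hcast, hstep]
      by_cases hz : (v + d) % n = 0
      · rw [if_pos hz, if_pos (factB.mp hz)]
        ring
      · rw [if_neg hz, if_neg (fun hc => hz (factB.mpr hc))]
        ring

-- ===== VERDICT (by name: the statement is the Claim_ definition above) =====
theorem apply_rotation_single_tick_spec : Claim_equal_apply_rotation_single_tick := by
  intro rotation cur n hdom hpre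
  unfold Spec_apply_rotation_single_tick
  by_cases h0 : rotation = 0
  · subst h0
    simp [apply_rotation_single_tick, apply_rotation_single_tick_alt, pvLoopA]
  · have hn : 1 ≤ n := hpre.resolve_left h0
    have hd : (if rotation > 0 then (1:Int) else -1) = 1 ∨
        (if rotation > 0 then (1:Int) else -1) = -1 := by
      split_ifs <;> simp
    unfold apply_rotation_single_tick apply_rotation_single_tick_alt
    rw [pvLoopA_spec _ n hd hn, if_neg h0,
      if_neg (by omega : ¬ rotation.natAbs = 0)]
    have habs : |rotation| = (rotation.natAbs : Int) := Int.abs_eq_natAbs rotation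
    simp only [habs, PySem.Int.mod_eq_emod_of_pos (show (0:Int) < n by omega),
      PySem.Int.floordiv_eq_ediv_of_pos (show (0:Int) < n by omega)]
    unfold pvCount
    rw [zero_add]
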